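-- pv_equiv track=rewrite | github.com/JisuPP/Study | PYTHON/수열과 구간 쿼리4.py | solution
-- ===== SOURCE A (Python) =====
-- def solution(arr, queries):
--     answer = []
--
--     for query in queries:
--         a, b, c = query
--         for i in range(a, b+1):
--             if i%c == 0:
--                 arr[i] = arr[i] + 1
--
--
--     return arr
-- ===== SOURCE B (Python) =====
-- def solution(arr, queries):
--     # builds a separate increment-count array, then combines it with arr in one
--     # final pass; does not mutate arr (A mutates it in place) -- the equivalence
--     # is about the return value
--     n = len(arr)
--     cnt = [0] * n
--     for a, b, c in queries:
--         if a <= b: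
--             k = abs(c)
--             for i in range(a + (-a) % k, b + 1, k):
--                 cnt[i] += 1
--     return [x + d for x, d in zip(arr, cnt)]
-- ===== Notes on version B (the rewrite author's own statement) =====
-- stated objective: alternative
-- what changed: B accumulates per-index increment counts in a separate counter array, striding directly over the multiples of |c| in [a,b] (range(start, b+1, |c|)) instead of scanning every index and testing i % c == 0, and then adds the counts to arr in one final zip pass, leaving arr unmutated.
import Mathlib
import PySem

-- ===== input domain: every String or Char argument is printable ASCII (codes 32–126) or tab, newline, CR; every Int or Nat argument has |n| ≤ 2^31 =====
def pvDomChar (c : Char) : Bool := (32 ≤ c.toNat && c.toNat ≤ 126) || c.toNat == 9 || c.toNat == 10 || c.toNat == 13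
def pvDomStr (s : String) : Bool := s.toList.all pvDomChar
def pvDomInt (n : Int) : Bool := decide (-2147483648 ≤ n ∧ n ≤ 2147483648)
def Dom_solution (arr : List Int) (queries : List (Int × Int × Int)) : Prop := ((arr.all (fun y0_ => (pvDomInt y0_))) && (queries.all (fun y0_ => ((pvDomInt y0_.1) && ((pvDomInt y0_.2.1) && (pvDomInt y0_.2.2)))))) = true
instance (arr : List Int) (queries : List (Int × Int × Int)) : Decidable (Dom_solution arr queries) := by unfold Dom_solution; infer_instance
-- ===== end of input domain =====

-- B accumulates per-index increment counts in a separate counter array (striding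
-- over the multiples of |c| instead of testing i % c == 0) and adds them to arr
-- in one final zip pass (objective: alternative). A mutates `arr` in place in
-- Python, B does not; the equivalence proved here is about the return value.

-- ===== PORT A =====
def solution (arr : List Int) (queries : List (Int × Int × Int)) : List Int :=
  queries.foldl (fun ar q =>
    (PySem.List.pyRange q.1 (q.2.1 + 1) 1).foldl (fun ar i =>
      if PySem.Int.mod i q.2.2 == 0 then
        PySem.List.pySetD ar i (PySem.List.pyGetD ar i 0 + 1)
      else ar) ar) arr

-- ===== PORT B =====
def solution_alt (arr : List Int) (queries : List (Int × Int × Int)) : List Int :=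
  let n := arr.length
  let cnt := queries.foldl (fun cnt q =>
    if q.1 ≤ q.2.1 then
      let k := |q.2.2|
      (PySem.List.pyRange (q.1 + PySem.Int.mod (-q.1) k) (q.2.1 + 1) k).foldl
        (fun cnt i => PySem.List.pySetD cnt i (PySem.List.pyGetD cnt i 0 + 1)) cnt
    else cnt) (List.replicate n (0 : Int))
  List.zipWith (· + ·) arr cnt

-- ===== PRECONDITION & SPEC =====
-- Pre_solution is exactly the set of inputs on which the Python A returns normally:
-- for every query (a,b,c) with a ≤ b it demands c ≠ 0 (else A's `i % c` raises
-- ZeroDivisionError) and, when some multiple of |c| lies in [a,b], that the smallest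
-- (s) and largest (b - b % |c|) such multiples are valid Python indices of arr
-- (negative-index wraparound allowed), else A's `arr[i]` raises IndexError.
def Pre_solution (arr : List Int) (queries : List (Int × Int × Int)) : Prop :=
  ∀ q ∈ queries, q.1 ≤ q.2.1 →
    q.2.2 ≠ 0 ∧
    (q.1 + (-q.1) % |q.2.2| ≤ q.2.1 →
      -(arr.length : Int) ≤ q.1 + (-q.1) % |q.2.2| ∧
      q.2.1 - q.2.1 % |q.2.2| < (arr.length : Int))
instance (arr : List Int) (queries : List (Int × Int × Int)) : Decidable (Pre_solution arr queries) := by unfold Pre_solution; infer_instance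

def pvWitness_solution : List Int × (List (Int × Int × Int)) := ([0, 1, 2, 3], [(1, 3, 2)])

def Spec_solution (arr : List Int) (queries : List (Int × Int × Int)) (out : List Int) : Prop := out = solution_alt arr queries
instance (arr : List Int) (queries : List (Int × Int × Int)) (out : List Int) : Decidable (Spec_solution arr queries out) := by unfold Spec_solution; infer_instance

-- ===== CLAIM (what is proved, stated in full; the proofs are below) =====
def Claim_equal_solution : Prop := ∀ (arr : List Int) (queries : List (Int × Int × Int)), Dom_solution arr queries → Pre_solution arr queries → Spec_solution arr queries (solution arr queries)

-- ===== LEMMAS AND PROOFS =====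

-- the stride fold of B, named for the proofs
def strideFold (queries : List (Int × Int × Int)) (ar : List Int) : List Int :=
  queries.foldl (fun cnt q =>
    if q.1 ≤ q.2.1 then
      let k := |q.2.2|
      (PySem.List.pyRange (q.1 + PySem.Int.mod (-q.1) k) (q.2.1 + 1) k).foldl
        (fun cnt i => PySem.List.pySetD cnt i (PySem.List.pyGetD cnt i 0 + 1)) cnt
    else cnt) ar

-- a fold with an if-guard is a fold over the filtered list
theorem foldl_if_filter {α β : Type} (p : α → Bool) (f : β → α → β) (l : List α) (init : β) :
    l.foldl (fun acc x => if p x then f acc x else acc) init = (l.filter p).foldl f init := by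
  induction l generalizing init with
  | nil => rfl
  | cons x t ih =>
      by_cases h : p x <;> simp [h, ih]

-- two strictly increasing lists with the same members are equal
theorem eq_of_pairwise_lt {l₁ : List Int} {l₂ : List Int} (h₁ : l₁.Pairwise (· < ·))
    (h₂ : l₂.Pairwise (· < ·)) (hm : ∀ x, x ∈ l₁ ↔ x ∈ l₂) : l₁ = l₂ := by
  induction l₁ generalizing l₂ with
  | nil =>
      cases l₂ with
      | nil => rfl
      | cons b t => exact absurd ((hm b).2 (List.mem_cons_self)) (List.not_mem_nil)
  | cons a t₁ ih =>
      cases l₂ with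
      | nil => exact absurd ((hm a).1 (List.mem_cons_self)) (List.not_mem_nil)
      | cons b t₂ =>
          obtain ⟨ha1, ht1⟩ := List.pairwise_cons.1 h₁
          obtain ⟨hb2, ht2⟩ := List.pairwise_cons.1 h₂
          have hab : a = b := by
            have h1 := (hm a).1 (List.mem_cons_self)
            have h2 := (hm b).2 (List.mem_cons_self)
            rcases List.mem_cons.1 h1 with h | h
            · exact h
            · rcases List.mem_cons.1 h2 with h' | h'
              · exact h'.symm
              · exact absurd (lt_trans (hb2 a h) (ha1 b h')) (lt_irrefl b)
          subst hab
          have hmt : ∀ x, x ∈ t₁ ↔ x ∈ t₂ := by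
            intro x
            constructor
            · intro hx
              rcases List.mem_cons.1 ((hm x).1 (List.mem_cons_of_mem _ hx)) with h | h
              · exact absurd (h ▸ ha1 x hx) (lt_irrefl x)
              · exact h
            · intro hx
              rcases List.mem_cons.1 ((hm x).2 (List.mem_cons_of_mem _ hx)) with h | h
              · exact absurd (h ▸ hb2 x hx) (lt_irrefl x)
              · exact h
          exact congrArg (a :: ·) (ih ht1 ht2 hmt)

theorem pairwise_lt_pyRange_pos (a b s : Int) (hs : 0 < s) :
    (PySem.List.pyRange a b s).Pairwise (· < ·) := by
  rw [PySem.List.pyRange_of_pos a b hs]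
  refine List.Pairwise.map _ ?_ List.pairwise_lt_range
  intro x y hxy
  have : (x : Int) < (y : Int) := by exact_mod_cast hxy
  nlinarith

-- the unit-step range filtered to the multiples of |c| is the strided range of B
theorem filter_mult_eq (a B c : Int) (hc : c ≠ 0) :
    (PySem.List.pyRange a B 1).filter (fun i => PySem.Int.mod i c == 0)
      = PySem.List.pyRange (a + PySem.Int.mod (-a) |c|) B |c| := by
  have hk : 0 < |c| := abs_pos.2 hc
  set s := a + PySem.Int.mod (-a) |c| with hsdef
  have hmod : PySem.Int.mod (-a) |c| = (-a) % |c| := PySem.Int.mod_eq_emod_of_pos hk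
  have h0 : 0 ≤ (-a) % |c| := Int.emod_nonneg _ (ne_of_gt hk)
  have h1 : (-a) % |c| < |c| := Int.emod_lt_of_pos _ hk
  have hks : |c| ∣ s := by
    refine ⟨-((-a) / |c|), ?_⟩
    have := Int.emod_def (-a) |c|
    rw [hsdef, hmod]
    linarith [Int.emod_def (-a) |c|]
  refine eq_of_pairwise_lt ?_ ?_ ?_
  · exact List.Pairwise.sublist List.filter_sublist (PySem.List.pairwise_lt_pyRange_one a B)
  · exact pairwise_lt_pyRange_pos _ _ _ hk
  · intro x
    rw [List.mem_filter, PySem.List.mem_pyRange_one,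
        PySem.List.mem_pyRange_iff_of_pos hk]
    constructor
    · rintro ⟨⟨hax, hxB⟩, hdv⟩
      have hdvd : |c| ∣ x := (abs_dvd _ _).2 ((PySem.Int.mod_eq_zero_iff_dvd x c).1 (by simpa using hdv))
      have hsx : s ≤ x := by
        by_contra hlt
        rw [not_le] at hlt
        have hd : |c| ∣ s - x := (Int.dvd_sub hks hdvd)
        have : |c| ≤ s - x := Int.le_of_dvd (by omega) hd
        rw [hsdef, hmod] at this
        omega
      exact ⟨hsx, hxB, Int.dvd_sub hdvd hks⟩
    · rintro ⟨hsx, hxB, hd⟩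
      have hdvd : |c| ∣ x := by
        have := Int.dvd_add hd hks
        simpa using this
      refine ⟨⟨by rw [hsdef, hmod] at hsx; omega, hxB⟩, ?_⟩
      simpa using (PySem.Int.mod_eq_zero_iff_dvd x c).2 ((abs_dvd _ _).1 hdvd)

-- one query of A equals one stride-fold step, given c ≠ 0 when the range is nonempty
theorem step_eq (ar : List Int) (a b c : Int) (h : a ≤ b → c ≠ 0) :
    (PySem.List.pyRange a (b + 1) 1).foldl (fun ar i =>
        if PySem.Int.mod i c == 0 then
          PySem.List.pySetD ar i (PySem.List.pyGetD ar i 0 + 1)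
        else ar) ar
      = if a ≤ b then
          (PySem.List.pyRange (a + PySem.Int.mod (-a) |c|) (b + 1) |c|).foldl (fun ar i =>
            PySem.List.pySetD ar i (PySem.List.pyGetD ar i 0 + 1)) ar
        else ar := by
  by_cases hab : a ≤ b
  · rw [if_pos hab, foldl_if_filter, filter_mult_eq a (b + 1) c (h hab)]
  · rw [if_neg hab, PySem.List.pyRange_one_eq_nil (by omega)]
    rfl

-- A equals the stride fold applied directly to arr
theorem solution_eq_strideFold (arr : List Int) (queries : List (Int × Int × Int))
    (hc : ∀ q ∈ queries, q.1 ≤ q.2.1 → q.2.2 ≠ 0) :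
    solution arr queries = strideFold queries arr := by
  unfold solution strideFold
  induction queries generalizing arr with
  | nil => rfl
  | cons q t ih =>
      simp only [List.foldl_cons]
      rw [step_eq arr q.1 q.2.1 q.2.2 (hc q List.mem_cons_self)]
      exact ih _ (fun q' hq' => hc q' (List.mem_cons_of_mem _ hq'))

-- resolved Python indices are in range
theorem pyIdx_lt (n : Nat) (i : Int) (k : Nat) (h : PySem.List.pyIdx? n i = some k) : k < n := by
  unfold PySem.List.pyIdx? at h
  split_ifs at h with h1 h2 h3 <;> simp_all <;> omega

-- one increment commutes with the final zip pass
theorem inc_comm (arr cnt : List Int) (i : Int) (hl : arr.length = cnt.length) :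
    PySem.List.pySetD (List.zipWith (· + ·) arr cnt) i
        (PySem.List.pyGetD (List.zipWith (· + ·) arr cnt) i 0 + 1)
      = List.zipWith (· + ·) arr (PySem.List.pySetD cnt i (PySem.List.pyGetD cnt i 0 + 1)) := by
  have hz : (List.zipWith (· + ·) arr cnt).length = cnt.length := by
    simp [List.length_zipWith, hl]
  cases h : PySem.List.pyIdx? cnt.length i with
  | none =>
      simp [PySem.List.pySetD, PySem.List.pySet?, hz, h]
  | some k =>
      have hk : k < cnt.length := pyIdx_lt _ _ _ h
      simp only [PySem.List.pySetD, PySem.List.pySet?, PySem.List.pyGetD, PySem.List.pyGet?,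
        hz, h, Option.map_some, Option.getD_some, Option.bind_some]
      refine List.ext_getElem (by simp [List.length_zipWith, hl]) ?_
      intro j hj1 hj2
      have hja : j < arr.length := by
        simp [List.length_zipWith, hl] at hj1; omega
      have hjc : j < cnt.length := by
        simp [List.length_zipWith, hl] at hj1; omega
      simp only [List.getElem_set, List.getElem_zipWith]
      by_cases hjk : k = j
      · subst hjk
        simp [hk, hl ▸ hk]
        ring
      · simp [hjk]

-- the stride fold commutes with the final zip pass
theorem strideFold_comm (queries : List (Int × Int × Int)) (arr cnt : List Int)
    (hl : arr.length = cnt.length) :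
    strideFold queries (List.zipWith (· + ·) arr cnt)
      = List.zipWith (· + ·) arr (strideFold queries cnt) := by
  induction queries generalizing cnt with
  | nil => rfl
  | cons q t ih =>
      unfold strideFold
      simp only [List.foldl_cons]
      by_cases hq : q.1 ≤ q.2.1
      · simp only [if_pos hq]
        generalize PySem.List.pyRange (q.1 + PySem.Int.mod (-q.1) |q.2.2|) (q.2.1 + 1) |q.2.2| = r
        -- inner fold commutes, by induction on the range list
        have inner : ∀ (r : List Int) (cnt : List Int), arr.length = cnt.length →
            r.foldl (fun cnt i => PySem.List.pySetD cnt i (PySem.List.pyGetD cnt i 0 + 1))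
              (List.zipWith (· + ·) arr cnt)
            = List.zipWith (· + ·) arr
                (r.foldl (fun cnt i => PySem.List.pySetD cnt i (PySem.List.pyGetD cnt i 0 + 1)) cnt) := by
          intro r
          induction r with
          | nil => intro cnt _; rfl
          | cons i t' ih' =>
              intro cnt hl'
              simp only [List.foldl_cons]
              rw [inc_comm arr cnt i hl']
              exact ih' _ (by rw [hl']; exact (PySem.List.length_pySetD _ _ _).symm)
        rw [inner r cnt hl]
        exact ih _ (by
          rw [hl]
          clear ih hl
          induction r generalizing cnt with
          | nil => rfl
          | cons i t' ih' =>
              simp only [List.foldl_cons]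
              rw [← ih' (PySem.List.pySetD cnt i (PySem.List.pyGetD cnt i 0 + 1))]
              simp [PySem.List.length_pySetD])
      · simp only [if_neg hq]
        exact ih cnt hl

theorem zipWith_replicate_zero (arr : List Int) :
    List.zipWith (· + ·) arr (List.replicate arr.length (0 : Int)) = arr := by
  induction arr with
  | nil => rfl
  | cons x t ih => simp [List.replicate_succ, ih]

-- ===== VERDICT (by name: the statement is the Claim_ definition above) =====
theorem solution_spec : Claim_equal_solution := by
  unfold Claim_equal_solution
  intro arr queries _ hpre
  unfold Spec_solution
  have h1 := solution_eq_strideFold arr queries (fun q hq hab => (hpre q hq hab).1)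
  show solution arr queries = solution_alt arr queries
  rw [h1]
  unfold solution_alt
  have h2 := strideFold_comm queries arr (List.replicate arr.length 0) (by simp)
  rw [zipWith_replicate_zero] at h2
  exact h2
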